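-- pv_equiv track=rewrite | github.com/jsavage/Binder-Jupyter-HCS-DSL | content/startup/hcs_magic.py | convert_hcs_to_mermaid
-- ===== SOURCE A (Python) =====
-- def convert_hcs_to_mermaid(hcs_input):
--     mermaid_lines = ['graph TD', 'linkStyle default interpolate basis']
--     feedback_count = 0
--     total_links = 0
--
--     for line in hcs_input.splitlines():
--         if ':' in line:
--             entities_part, actions = line.split(':', 1)
--             source, target = [e.strip() for e in entities_part.split()]
--             actions = actions.strip()
--             if source == 'Person':
--                 source = 'Person([Person])'
--             if actions:
--                 if '/' in actions:
--                     actions_list, feedback = actions.split('/', 1)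
--                     if actions_list.strip():
--                         actions_list = actions_list.strip().split(',')
--                         for action in actions_list:
--                             if action.strip():
--                                 mermaid_lines.append(f'{source}-->|{action.strip()}|{target}')
--                                 total_links += 1
--                     if feedback.strip():
--                         feedback_list = feedback.strip().split(',')
--                         for fb in feedback_list:
--                             if fb.strip():
--                                 mermaid_lines.append(f'{target}-->|{fb.strip()}|{source}')
--                                 mermaid_lines.append(f'linkStyle {total_links} stroke:#ff0000,color:#ff0000')
--                                 total_links += 1
--                 else:
--                     actions_list = actions.strip().split(',')
--                     for action in actions_list:
--                         if action.strip():
--                             mermaid_lines.append(f'{source}-->|{action.strip()}|{target}')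
--                             total_links += 1
--
--     return '\n'.join(mermaid_lines)
-- ===== SOURCE B (Python) =====
-- def convert_hcs_to_mermaid(hcs_input):
--     # Pass 1: collect edge records (source, target, label, is_feedback) in order.
--     edges = []
--     for line in hcs_input.splitlines():
--         if ':' in line:
--             entities_part, actions = line.split(':', 1)
--             source, target = [e.strip() for e in entities_part.split()]
--             if source == 'Person':
--                 source = 'Person([Person])'
--             actions = actions.strip()
--             if actions:
--                 fwd, _, fb = actions.partition('/')
--                 edges += [(source, target, a.strip(), False)
--                           for a in fwd.strip().split(',') if a.strip()]
--                 edges += [(target, source, f.strip(), True)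
--                           for f in fb.strip().split(',') if f.strip()]
--     # Pass 2: render; the edge's index is exactly A's running link counter.
--     out = ['graph TD', 'linkStyle default interpolate basis']
--     for i, (s, t, lab, fb) in enumerate(edges):
--         out.append(f'{s}-->|{lab}|{t}')
--         if fb:
--             out.append(f'linkStyle {i} stroke:#ff0000,color:#ff0000')
--     return '\n'.join(out)
-- ===== Notes on version B (the rewrite author's own statement) =====
-- stated objective: alternative
-- what changed: A interleaves parsing and output inside one loop with a running link counter; B first collects a flat list of edge records (source, target, label, is_feedback) per line via str.partition and comprehensions, then renders all mermaid lines in a second enumerate pass, the edge's list index standing in for A's counter.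
-- outside the precondition, e.g. on convert_hcs_to_mermaid(':'): A raises ValueError, B raises ValueError
import Mathlib
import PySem

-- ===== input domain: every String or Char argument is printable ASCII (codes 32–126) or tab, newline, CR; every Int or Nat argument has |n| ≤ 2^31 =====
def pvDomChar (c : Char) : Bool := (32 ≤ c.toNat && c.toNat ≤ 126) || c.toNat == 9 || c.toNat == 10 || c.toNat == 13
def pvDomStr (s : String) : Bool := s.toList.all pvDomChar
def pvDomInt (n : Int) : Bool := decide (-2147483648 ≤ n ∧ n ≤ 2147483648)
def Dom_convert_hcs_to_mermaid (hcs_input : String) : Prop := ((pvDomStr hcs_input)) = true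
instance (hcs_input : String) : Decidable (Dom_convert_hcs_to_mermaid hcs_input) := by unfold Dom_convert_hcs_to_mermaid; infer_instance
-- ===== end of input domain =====

-- B collects (source, target, label, is_feedback) edge records in one pass and renders them in a
-- second pass, the edge's list index reproducing A's running link counter (objective: alternative).

-- shared string-building helpers (the f-strings of both Pythons)
def pvArrow (src label tgt : List Char) : List Char :=
  src ++ "-->|".toList ++ label ++ "|".toList ++ tgt

def pvStyle (i : Int) : List Char :=
  "linkStyle ".toList ++ PySem.Int.toChars i ++ " stroke:#ff0000,color:#ff0000".toList

-- ===== PORT A =====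
-- per-line body of A's loop; state = (mermaid_lines, total_links)
def pvAStep (st : List (List Char) × Int) (line : List Char) : List (List Char) × Int :=
  if PySem.Chars.isIn [':'] line then
    match PySem.Chars.splitOnMax line [':'] 1 with
    | [entities_part, actions0] =>
      match (PySem.Chars.split₀ entities_part).map PySem.Chars.strip with
      | [source0, target] =>
        let actions := PySem.Chars.strip actions0
        let source := if source0 = "Person".toList then "Person([Person])".toList else source0
        if actions ≠ [] then
          if PySem.Chars.isIn ['/'] actions then
            match PySem.Chars.splitOnMax actions ['/'] 1 with
            | [actions_list0, feedback] =>
              let st1 :=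
                if PySem.Chars.strip actions_list0 ≠ [] then
                  (PySem.Chars.splitOn (PySem.Chars.strip actions_list0) [',']).foldl
                    (fun st action =>
                      if PySem.Chars.strip action ≠ [] then
                        (st.1 ++ [pvArrow source (PySem.Chars.strip action) target], st.2 + 1)
                      else st) st
                else st
              if PySem.Chars.strip feedback ≠ [] then
                (PySem.Chars.splitOn (PySem.Chars.strip feedback) [',']).foldl
                  (fun st fb =>
                    if PySem.Chars.strip fb ≠ [] then
                      (st.1 ++ [pvArrow target (PySem.Chars.strip fb) source, pvStyle st.2], st.2 + 1)
                    else st) st1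
              else st1
            | _ => st  -- unreachable: '/' ∈ actions makes splitOnMax return two pieces
          else
            (PySem.Chars.splitOn (PySem.Chars.strip actions) [',']).foldl
              (fun st action =>
                if PySem.Chars.strip action ≠ [] then
                  (st.1 ++ [pvArrow source (PySem.Chars.strip action) target], st.2 + 1)
                else st) st
        else st
      | _ => st  -- Python raises ValueError here (unpack ≠ 2 names); excluded by Pre_
    | _ => st  -- unreachable: ':' ∈ line makes splitOnMax return two pieces
  else st

def convert_hcs_to_mermaid (hcs_input : String) : String :=
  let init : List (List Char) × Int :=
    (["graph TD".toList, "linkStyle default interpolate basis".toList], 0)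
  let st := (PySem.Chars.splitlines hcs_input.toList).foldl pvAStep init
  String.mk (PySem.Chars.join ['\n'] st.1)

-- ===== PORT B =====
-- hand-written port of str.partition('/') (PySem has none): exact, since with '/' present
-- splitOnMax s ['/'] 1 yields the two surrounding pieces, else the whole string
def pvPartSlash (s : List Char) : List Char × List Char :=
  if PySem.Chars.isIn ['/'] s then
    match PySem.Chars.splitOnMax s ['/'] 1 with
    | [f, b] => (f, b)
    | _ => ([], [])  -- unreachable: '/' present guarantees two pieces
  else (s, [])

-- the edge records B's first pass collects for one line
def pvLineEdges (line : List Char) : List (List Char × List Char × List Char × Bool) :=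
  if PySem.Chars.isIn [':'] line then
    match PySem.Chars.splitOnMax line [':'] 1 with
    | [entities_part, actions0] =>
      match (PySem.Chars.split₀ entities_part).map PySem.Chars.strip with
      | [source0, target] =>
        let source := if source0 = "Person".toList then "Person([Person])".toList else source0
        let actions := PySem.Chars.strip actions0
        if actions ≠ [] then
          let p := pvPartSlash actions
          ((PySem.Chars.splitOn (PySem.Chars.strip p.1) [',']).filter
              (fun a => decide (PySem.Chars.strip a ≠ []))).map
            (fun a => (source, target, PySem.Chars.strip a, false))
          ++ ((PySem.Chars.splitOn (PySem.Chars.strip p.2) [',']).filter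
              (fun f => decide (PySem.Chars.strip f ≠ []))).map
            (fun f => (target, source, PySem.Chars.strip f, true))
        else []
      | _ => []  -- Python raises ValueError here; excluded by Pre_
    | _ => []
  else []

def convert_hcs_to_mermaid_alt (hcs_input : String) : String :=
  let edges := (PySem.Chars.splitlines hcs_input.toList).foldl
    (fun es line => es ++ pvLineEdges line) []
  let out := (PySem.List.enumerate edges 0).foldl
    (fun out p =>
      let out := out ++ [pvArrow p.2.1 p.2.2.2.1 p.2.2.1]
      if p.2.2.2.2 then out ++ [pvStyle p.1] else out)
    (["graph TD".toList, "linkStyle default interpolate basis".toList])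
  String.mk (PySem.Chars.join ['\n'] out)

-- ===== PRECONDITION & SPEC =====
-- Pre_ excludes exactly the inputs where Python raises ValueError: a line containing ':'
-- whose part before the first ':' does not split into exactly two whitespace-separated tokens.
def Pre_convert_hcs_to_mermaid (hcs_input : String) : Prop :=
  ∀ line ∈ PySem.Chars.splitlines hcs_input.toList,
    PySem.Chars.isIn [':'] line = true →
    (PySem.Chars.split₀ ((PySem.Chars.splitOnMax line [':'] 1).headI)).length = 2
instance (hcs_input : String) : Decidable (Pre_convert_hcs_to_mermaid hcs_input) := by
  unfold Pre_convert_hcs_to_mermaid; infer_instance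

def pvWitness_convert_hcs_to_mermaid : String :=
  "Person Cat : feeds, pets / purrs\nCat Mouse : chases"

def Spec_convert_hcs_to_mermaid (hcs_input : String) (out : String) : Prop := out = convert_hcs_to_mermaid_alt hcs_input
instance (hcs_input : String) (out : String) : Decidable (Spec_convert_hcs_to_mermaid hcs_input out) := by unfold Spec_convert_hcs_to_mermaid; infer_instance

-- ===== CLAIM (what is proved, stated in full; the proofs are below) =====
def Claim_equal_convert_hcs_to_mermaid : Prop := ∀ (hcs_input : String), Dom_convert_hcs_to_mermaid hcs_input → Pre_convert_hcs_to_mermaid hcs_input → Spec_convert_hcs_to_mermaid hcs_input (convert_hcs_to_mermaid hcs_input)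

-- ===== LEMMAS AND PROOFS =====

def pvRender (i : Int) : List (List Char × List Char × List Char × Bool) → List (List Char)
  | [] => []
  | e :: es =>
    (pvArrow e.1 e.2.2.1 e.2.1 :: if e.2.2.2 then [pvStyle i] else []) ++ pvRender (i + 1) es

theorem pvRender_append (xs ys : List (List Char × List Char × List Char × Bool)) (i : Int) :
    pvRender i (xs ++ ys) = pvRender i xs ++ pvRender (i + xs.length) ys := by
  induction xs generalizing i with
  | nil => simp [pvRender]
  | cons e es ih => simp [pvRender, ih, add_assoc, add_comm 1 (es.length : Int)]

theorem pvFold_fwd (l : List (List Char)) (src tgt : List Char)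
    (acc : List (List Char)) (n : Int) :
    l.foldl (fun st action =>
        if PySem.Chars.strip action ≠ [] then
          (st.1 ++ [pvArrow src (PySem.Chars.strip action) tgt], st.2 + 1)
        else st) (acc, n)
    = (acc ++ pvRender n ((l.filter (fun a => decide (PySem.Chars.strip a ≠ []))).map
          (fun a => (src, tgt, PySem.Chars.strip a, false))),
       n + ((l.filter (fun a => decide (PySem.Chars.strip a ≠ []))).length : Int)) := by
  induction l generalizing acc n with
  | nil => simp [pvRender]
  | cons a l ih =>
    simp only [List.foldl_cons, List.filter_cons]
    by_cases h : PySem.Chars.strip a ≠ []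
    · rw [if_pos h, ih]
      simp [h, pvRender]
      omega
    · rw [if_neg h, ih]
      simp [h]

theorem pvFold_fb (l : List (List Char)) (src tgt : List Char)
    (acc : List (List Char)) (n : Int) :
    l.foldl (fun st fb =>
        if PySem.Chars.strip fb ≠ [] then
          (st.1 ++ [pvArrow src (PySem.Chars.strip fb) tgt, pvStyle st.2], st.2 + 1)
        else st) (acc, n)
    = (acc ++ pvRender n ((l.filter (fun a => decide (PySem.Chars.strip a ≠ []))).map
          (fun a => (src, tgt, PySem.Chars.strip a, true))),
       n + ((l.filter (fun a => decide (PySem.Chars.strip a ≠ []))).length : Int)) := by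
  induction l generalizing acc n with
  | nil => simp [pvRender]
  | cons a l ih =>
    simp only [List.foldl_cons, List.filter_cons]
    by_cases h : PySem.Chars.strip a ≠ []
    · rw [if_pos h, ih]
      simp [h, pvRender]
      omega
    · rw [if_neg h, ih]
      simp [h]

theorem pvFilter_strip_nil (s : List Char) (h : PySem.Chars.strip s = []) :
    (PySem.Chars.splitOn (PySem.Chars.strip s) [',']).filter
        (fun a => decide (PySem.Chars.strip a ≠ [])) = [] := by
  rw [h]; decide

theorem pvSplitOnNil : PySem.Chars.splitOn ([] : List Char) [','] = [[]] := by decide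
theorem pvStripNilChars : PySem.Chars.strip ([] : List Char) = [] := by decide

theorem pvSlashCase (src tgt actions_list0 feedback : List Char)
    (acc : List (List Char)) (n : Int) :
    (if PySem.Chars.strip feedback ≠ [] then
        List.foldl (fun st fb =>
            if PySem.Chars.strip fb ≠ [] then
              (st.1 ++ [pvArrow tgt (PySem.Chars.strip fb) src, pvStyle st.2], st.2 + 1)
            else st)
          (if PySem.Chars.strip actions_list0 ≠ [] then
              List.foldl (fun st action =>
                  if PySem.Chars.strip action ≠ [] then
                    (st.1 ++ [pvArrow src (PySem.Chars.strip action) tgt], st.2 + 1)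
                  else st)
                (acc, n) (PySem.Chars.splitOn (PySem.Chars.strip actions_list0) [','])
            else (acc, n))
          (PySem.Chars.splitOn (PySem.Chars.strip feedback) [','])
      else
        if PySem.Chars.strip actions_list0 ≠ [] then
          List.foldl (fun st action =>
              if PySem.Chars.strip action ≠ [] then
                (st.1 ++ [pvArrow src (PySem.Chars.strip action) tgt], st.2 + 1)
              else st)
            (acc, n) (PySem.Chars.splitOn (PySem.Chars.strip actions_list0) [','])
        else (acc, n))
    = (acc ++ pvRender n
          (((PySem.Chars.splitOn (PySem.Chars.strip actions_list0) [',']).filter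
              (fun a => decide (PySem.Chars.strip a ≠ []))).map
              (fun a => (src, tgt, PySem.Chars.strip a, false))
            ++ ((PySem.Chars.splitOn (PySem.Chars.strip feedback) [',']).filter
              (fun f => decide (PySem.Chars.strip f ≠ []))).map
              (fun f => (tgt, src, PySem.Chars.strip f, true))),
        n + ((((PySem.Chars.splitOn (PySem.Chars.strip actions_list0) [',']).filter
              (fun a => decide (PySem.Chars.strip a ≠ []))).map
              (fun a => (src, tgt, PySem.Chars.strip a, false))
            ++ ((PySem.Chars.splitOn (PySem.Chars.strip feedback) [',']).filter
              (fun f => decide (PySem.Chars.strip f ≠ []))).map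
              (fun f => (tgt, src, PySem.Chars.strip f, true))).length : Int)) := by
  by_cases hfw : PySem.Chars.strip actions_list0 = []
  · have h2 : ¬(PySem.Chars.strip actions_list0 ≠ []) := fun h => h hfw
    by_cases hfb : PySem.Chars.strip feedback = []
    · have h1 : ¬(PySem.Chars.strip feedback ≠ []) := fun h => h hfb
      rw [if_neg h1, if_neg h2, pvFilter_strip_nil actions_list0 hfw,
        pvFilter_strip_nil feedback hfb]
      simp [pvRender]
    · rw [if_pos hfb, if_neg h2, pvFold_fb, pvFilter_strip_nil actions_list0 hfw]
      simp
  · by_cases hfb : PySem.Chars.strip feedback = []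
    · have h1 : ¬(PySem.Chars.strip feedback ≠ []) := fun h => h hfb
      rw [if_neg h1, if_pos hfw, pvFold_fwd, pvFilter_strip_nil feedback hfb]
      simp
    · rw [if_pos hfb, if_pos hfw, pvFold_fwd, pvFold_fb, pvRender_append]
      simp [Prod.mk.injEq, List.append_assoc]
      omega

theorem pvStep_eq_render (line : List Char) (acc : List (List Char)) (n : Int) :
    pvAStep (acc, n) line
      = (acc ++ pvRender n (pvLineEdges line), n + ((pvLineEdges line).length : Int)) := by
  unfold pvAStep pvLineEdges pvPartSlash
  split
  · split
    next entities_part actions0 heq =>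
      split
      next source0 target heq2 =>
        simp only []
        split
        next hne =>
          split
          next hsl =>
            split
            next actions_list0 feedback heq3 =>
              exact pvSlashCase _ _ actions_list0 feedback acc n
            next x hx =>
              simp [pvSplitOnNil, pvStripNilChars, pvRender]
          next hsl =>
            rw [pvFold_fwd]
            simp [pvSplitOnNil, pvStripNilChars, pvRender_append]
        next hne => simp [pvRender]
      next => simp [pvRender]
    next => simp [pvRender]
  · simp [pvRender]

-- A's whole loop appends the rendering of all collected edges, counting links from 0
theorem pvFoldA_eq (L : List (List Char)) (acc : List (List Char)) (n : Int) :
    L.foldl pvAStep (acc, n)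
      = (acc ++ pvRender n (L.flatMap pvLineEdges),
         n + ((L.flatMap pvLineEdges).length : Int)) := by
  induction L generalizing acc n with
  | nil => simp [pvRender]
  | cons line L ih =>
    simp only [List.foldl_cons, pvStep_eq_render, ih, List.flatMap_cons, pvRender_append,
      List.length_append, Prod.mk.injEq, List.append_assoc]
    exact ⟨by simp, by push_cast; ring⟩

-- B's enumerate-render loop computes pvRender
theorem pvFoldB_eq (edges : List (List Char × List Char × List Char × Bool))
    (acc : List (List Char)) (i : Int) :
    (PySem.List.enumerate edges i).foldl
        (fun out p =>
          let out := out ++ [pvArrow p.2.1 p.2.2.2.1 p.2.2.1]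
          if p.2.2.2.2 then out ++ [pvStyle p.1] else out) acc
      = acc ++ pvRender i edges := by
  induction edges generalizing acc i with
  | nil => simp [PySem.List.enumerate, pvRender]
  | cons e es ih =>
    rw [PySem.List.enumerate_cons]
    simp only [List.foldl_cons, ih, pvRender]
    cases hfb : e.2.2.2 <;> simp

-- ===== VERDICT (by name: the statement is the Claim_ definition above) =====
theorem convert_hcs_to_mermaid_spec : Claim_equal_convert_hcs_to_mermaid := by
  intro s _ _
  unfold Spec_convert_hcs_to_mermaid convert_hcs_to_mermaid convert_hcs_to_mermaid_alt
  simp only []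
  rw [PySem.List.foldl_append_eq_flatMap, pvFoldA_eq, pvFoldB_eq]
  simp
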